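-- pv_equiv track=rewrite | github.com/Krishna1512-coder/Illumio_Challenge | Firewall.py | check_ip_present
-- ===== SOURCE A (Python) =====
-- def check_ip_present(iprangelist, ipaddr):
--     left, right = 0, len(iprangelist) - 1
--     while left <= right:
--         pivot = left + (right - left) // 2
--
--         if iprangelist[pivot][0] <= ipaddr and iprangelist[pivot][1] >= ipaddr:
--             return True
--
--         if ipaddr < iprangelist[pivot][0]:
--             right = pivot - 1
--         else:
--             left = pivot + 1
--     return False
-- ===== SOURCE B (Python) =====
-- def check_ip_present(iprangelist, ipaddr):
--     # Recursive binary search on list slices: the pivot cell of a slice of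
--     # length n is index (n - 1) // 2, which visits exactly the same cells
--     # as an index-based search with pivot = left + (right - left) // 2.
--     def go(seg):
--         if not seg:
--             return False
--         m = (len(seg) - 1) // 2
--         lo, hi = seg[m]
--         if lo <= ipaddr <= hi:
--             return True
--         if ipaddr < lo:
--             return go(seg[:m])
--         return go(seg[m + 1:])
--     return go(iprangelist)
-- ===== Notes on version B (the rewrite author's own statement) =====
-- stated objective: alternative
-- what changed: Replaces the index-based while loop (left/right pointers into the original list) with a recursive binary search on list slices, where the pivot of a slice of length n is index (n-1)//2, visiting the same cells in the same order.
import Mathlib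
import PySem

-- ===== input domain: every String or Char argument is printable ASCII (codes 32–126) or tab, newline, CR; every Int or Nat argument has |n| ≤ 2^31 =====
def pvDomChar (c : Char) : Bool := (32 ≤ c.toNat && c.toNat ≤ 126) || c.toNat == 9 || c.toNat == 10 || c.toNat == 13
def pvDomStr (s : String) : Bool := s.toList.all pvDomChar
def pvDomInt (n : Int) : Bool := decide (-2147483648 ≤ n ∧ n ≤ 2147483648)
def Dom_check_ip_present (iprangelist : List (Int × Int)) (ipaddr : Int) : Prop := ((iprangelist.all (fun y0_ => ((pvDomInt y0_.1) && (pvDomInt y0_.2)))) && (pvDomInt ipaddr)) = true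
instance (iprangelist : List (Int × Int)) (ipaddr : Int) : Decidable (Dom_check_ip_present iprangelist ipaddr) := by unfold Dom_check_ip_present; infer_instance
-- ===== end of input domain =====

-- B rewrites A's index-based while loop as a recursive binary search on list
-- slices (same pivot cells in the same order); objective: alternative decomposition.

-- ===== PORT A =====
-- A's while loop over (left, right), literal: pivot = left + (right-left)//2,
-- membership test, then shrink right or left.
def checkLoopA (iprangelist : List (Int × Int)) (ipaddr : Int) (left right : Int) : Bool :=
  if _h : left ≤ right then
    let pivot := left + PySem.Int.floordiv (right - left) 2
    match PySem.List.pyGet? iprangelist pivot with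
    | some (lo, hi) =>
      if lo ≤ ipaddr ∧ hi ≥ ipaddr then true
      else if ipaddr < lo then checkLoopA iprangelist ipaddr left (pivot - 1)
      else checkLoopA iprangelist ipaddr (pivot + 1) right
    | none => false  -- IndexError; unreachable from A's initial call (0 ≤ pivot < len)
  else false
termination_by (right + 1 - left).toNat
decreasing_by
  all_goals
    have h2 : PySem.Int.floordiv (right - left) 2 = (right - left) / 2 :=
      PySem.Int.floordiv_eq_ediv_of_pos (by omega)
    simp only [h2] at *
    omega

def check_ip_present (iprangelist : List (Int × Int)) (ipaddr : Int) : Bool :=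
  checkLoopA iprangelist ipaddr 0 (iprangelist.length - 1)

-- ===== PORT B =====
-- B's inner go(seg): pivot cell of a slice of length n is index (n-1)//2;
-- recurse on seg[:m] or seg[m+1:].
def checkGoB (ipaddr : Int) (seg : List (Int × Int)) : Bool :=
  if seg.isEmpty then false
  else
    let m : Nat := (seg.length - 1) / 2
    match seg[m]? with
    | some (lo, hi) =>
      if lo ≤ ipaddr ∧ ipaddr ≤ hi then true
      else if ipaddr < lo then checkGoB ipaddr (seg.take m)
      else checkGoB ipaddr (seg.drop (m + 1))
    | none => false  -- unreachable: m < seg.length for nonempty seg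
termination_by seg.length
decreasing_by
  all_goals simp_all [List.isEmpty_iff, List.length_take]
  all_goals cases seg with
  | nil => simp_all
  | cons a t => simp only [List.length_cons]; omega

def check_ip_present_alt (iprangelist : List (Int × Int)) (ipaddr : Int) : Bool :=
  checkGoB ipaddr iprangelist

-- ===== PRECONDITION & SPEC =====
def Spec_check_ip_present (iprangelist : List (Int × Int)) (ipaddr : Int) (out : Bool) : Prop := out = check_ip_present_alt iprangelist ipaddr
instance (iprangelist : List (Int × Int)) (ipaddr : Int) (out : Bool) : Decidable (Spec_check_ip_present iprangelist ipaddr out) := by unfold Spec_check_ip_present; infer_instance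

-- ===== CLAIM (what is proved, stated in full; the proofs are below) =====
def Claim_equal_check_ip_present : Prop := ∀ (iprangelist : List (Int × Int)) (ipaddr : Int), Dom_check_ip_present iprangelist ipaddr → Spec_check_ip_present iprangelist ipaddr (check_ip_present iprangelist ipaddr)

-- ===== LEMMAS AND PROOFS =====

-- Bridge: A's loop on index window [l, r] equals B's recursion on the slice
-- xs[l : r+1], by strong induction on the window size.
theorem checkLoopA_eq_goB (xs : List (Int × Int)) (ip : Int) :
    ∀ (n : Nat) (l r : Int), (r + 1 - l).toNat = n → 0 ≤ l → r < (xs.length : Int) →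
      checkLoopA xs ip l r = checkGoB ip ((xs.drop l.toNat).take (r + 1 - l).toNat) := by
  intro n
  induction n using Nat.strong_induction_on with
  | _ n ih =>
    intro l r hn hl hr
    by_cases hlr : l ≤ r
    · -- window nonempty
      have hlen : ((xs.drop l.toNat).take (r + 1 - l).toNat).length = (r + 1 - l).toNat := by
        simp [List.length_take, List.length_drop]; omega
      set seg := (xs.drop l.toNat).take (r + 1 - l).toNat with hseg
      have hne : ¬ seg.isEmpty := by
        rw [List.isEmpty_iff_length_eq_zero, hlen]; omega
      have hdiv : PySem.Int.floordiv (r - l) 2 = (r - l) / 2 :=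
        PySem.Int.floordiv_eq_ediv_of_pos (by omega)
      set m : Nat := (seg.length - 1) / 2 with hm
      have hmval : (m : Int) = (r - l) / 2 := by rw [hm, hlen]; omega
      set pivot : Int := l + PySem.Int.floordiv (r - l) 2 with hpiv
      have hpivint : pivot = l + (r - l) / 2 := by rw [hpiv, hdiv]
      have hplo : l ≤ pivot := by rw [hpivint]; omega
      have hphi : pivot ≤ r := by rw [hpivint]; omega
      have hptn : pivot.toNat = l.toNat + m := by
        have := hmval; omega
      have hget : PySem.List.pyGet? xs pivot = seg[m]? := by
        rw [PySem.List.pyGet?_of_nonneg xs (show (0:Int) ≤ pivot by omega), hseg]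
        rw [List.getElem?_take_of_lt (by omega : m < (r + 1 - l).toNat),
            List.getElem?_drop, hptn]
      have hleft : seg.take m = (xs.drop l.toNat).take (pivot - 1 + 1 - l).toNat := by
        rw [hseg, List.take_take]
        congr 1
        omega
      have hright : seg.drop (m + 1) =
          (xs.drop (pivot + 1).toNat).take (r + 1 - (pivot + 1)).toNat := by
        rw [hseg, List.drop_take, List.drop_drop]
        have e1 : (r + 1 - l).toNat - (m + 1) = (r + 1 - (pivot + 1)).toNat := by omega
        have e2 : l.toNat + (m + 1) = (pivot + 1).toNat := by omega
        rw [e1, e2]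
      rw [checkLoopA, dif_pos hlr, checkGoB, if_neg hne]
      simp only [← hpiv, ← hm, hget]
      cases hg : seg[m]? with
      | none => simp
      | some p =>
        obtain ⟨lo, hi⟩ := p
        simp only
        split_ifs with h1 h2
        · rfl
        · -- recurse on the left slice
          rw [ih (pivot - 1 + 1 - l).toNat (by omega) l (pivot - 1) rfl hl (by omega), hleft]
        · -- recurse on the right slice
          rw [ih (r + 1 - (pivot + 1)).toNat (by omega) (pivot + 1) r rfl (by omega) hr, hright]
    · -- window empty: both sides are false
      have h0 : (r + 1 - l).toNat = 0 := by omega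
      rw [checkLoopA, dif_neg hlr, h0]
      simp [checkGoB]

-- ===== VERDICT (by name: the statement is the Claim_ definition above) =====
theorem check_ip_present_spec : Claim_equal_check_ip_present := by
  intro xs ip _
  unfold Spec_check_ip_present check_ip_present check_ip_present_alt
  have h := checkLoopA_eq_goB xs ip (((xs.length : Int) - 1 + 1 - 0).toNat) 0
    ((xs.length : Int) - 1) rfl (by omega) (by omega)
  have hlen : (((xs.length : Int)) - 1 + 1 - 0).toNat = xs.length := by omega
  rw [h]
  simp
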